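-- pv_equiv track=rewrite | github.com/IkramInf/BioinformaticsInAction-MyFreelanceProjectArchive | 161. InDel Right Alignment/right_align_indels.py | expand_cigar
-- ===== SOURCE A (Python) =====
-- def expand_cigar(reference, query, cigartuples):
--     """
--     Expands the CIGAR string representation of sequence alignment into the actual alignment strings.
--
--     Parameters:
--         reference (str): The reference sequence.
--         query (str): The query sequence.
--         cigartuples (list): List of tuples representing the CIGAR string.
--                             Each tuple contains two elements: operation and length.
--                             Operation can be one of the following:
--                             - 0: Match or Mismatch
--                             - 1: Insertion
--                             - 2: Deletion
--                             - 3: Skipped region from reference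
--                             - 7: Match
--                             - 8: Mismatch
--     Returns:
--         tuple: A tuple containing two strings: (new_ref, new_query).
--                new_ref: The aligned reference sequence after expansion.
--                new_query: The aligned query sequence after expansion.
--     """
--     new_ref = ""
--     new_query = ""
--     ref_pos = 0
--     query_pos = 0
--
--     for operation, length in cigartuples:
--         if operation == 0:  # Match or Mismatch
--             ref_pos += length
--             query_pos += length
--             new_ref += reference[ref_pos - length : ref_pos]
--             new_query += query[query_pos - length : query_pos]
--
--         elif operation == 1:  # Insertion
--             query_pos += length
--             new_ref += "-" * length
--             new_query += query[query_pos - length : query_pos]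
--
--         elif operation == 2:  # Deletion
--             ref_pos += length
--             new_ref += reference[ref_pos - length : ref_pos]
--             new_query += "-" * length
--
--         elif operation == 3:  # Skipped region from reference
--             ref_pos += length
--
--         elif operation == 7:  # Match
--             ref_pos += length
--             query_pos += length
--             new_ref += reference[ref_pos - length : ref_pos]
--             new_query += query[query_pos - length : query_pos]
--
--         elif operation == 8:  # Mismatch
--             ref_pos += length
--             query_pos += length
--             new_ref += reference[ref_pos - length : ref_pos]
--             new_query += query[query_pos - length : query_pos]
--
--         else:
--             pass
--
--     return (new_ref, new_query)
-- ===== SOURCE B (Python) =====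
-- # Staged rewrite: pass 1 precomputes each op's start cursor in ref and query;
-- # then ref and query outputs are built independently, each in its own pass.
-- REF_ADV = (0, 2, 3, 7, 8)   # ops that consume reference
-- QRY_ADV = (0, 1, 7, 8)      # ops that consume query
--
-- def expand_cigar(reference, query, cigartuples):
--     # stage 1: start positions of every op in each sequence
--     ref_starts, query_starts = [], []
--     r = q = 0
--     for op, ln in cigartuples:
--         ref_starts.append(r)
--         query_starts.append(q)
--         if op in REF_ADV:
--             r += ln
--         if op in QRY_ADV:
--             q += ln
--     # stage 2: reference line, independent of query bookkeeping
--     new_ref = ''.join(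
--         reference[s:s + ln] if op in (0, 2, 7, 8)
--         else '-' * ln if op == 1
--         else ''
--         for (op, ln), s in zip(cigartuples, ref_starts))
--     # stage 3: query line, independent of reference bookkeeping
--     new_query = ''.join(
--         query[s:s + ln] if op in (0, 1, 7, 8)
--         else '-' * ln if op == 2
--         else ''
--         for (op, ln), s in zip(cigartuples, query_starts))
--     return (new_ref, new_query)
-- ===== Notes on version B (the rewrite author's own statement) =====
-- stated objective: alternative
-- what changed: Replaced A's single stateful loop with interleaved six-way branching by a staged design: one pass precomputes every op's start cursor in ref and query, then the reference and query lines are each built in an independent join pass over the ops zipped with their precomputed starts.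
import Mathlib
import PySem

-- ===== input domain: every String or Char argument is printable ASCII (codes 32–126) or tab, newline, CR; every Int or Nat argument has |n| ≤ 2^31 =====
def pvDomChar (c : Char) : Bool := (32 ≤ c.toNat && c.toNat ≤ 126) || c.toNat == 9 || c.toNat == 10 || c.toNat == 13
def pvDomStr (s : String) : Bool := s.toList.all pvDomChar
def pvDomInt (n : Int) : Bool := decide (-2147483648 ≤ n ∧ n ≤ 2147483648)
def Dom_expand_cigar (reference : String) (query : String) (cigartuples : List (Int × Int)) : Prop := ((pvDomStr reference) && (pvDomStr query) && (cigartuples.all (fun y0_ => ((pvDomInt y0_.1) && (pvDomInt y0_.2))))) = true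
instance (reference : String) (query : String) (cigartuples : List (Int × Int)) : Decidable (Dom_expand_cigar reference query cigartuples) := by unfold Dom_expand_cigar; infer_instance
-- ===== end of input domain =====

-- B replaces A's single stateful six-way branch loop by staged passes: first precompute
-- every op's start cursor, then build the ref and query lines in two independent passes.
-- Same return value; objective: alternative.

-- ===== PORT A =====
-- one iteration of A's for-loop, branch for branch (slices/`'-'*length` via PySem)
def pvAStep (r q : List Char) (s : List Char × List Char × Int × Int) (p : Int × Int) :
    List Char × List Char × Int × Int :=
  let (new_ref, new_query, ref_pos, query_pos) := s
  let (operation, length) := p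
  if operation = 0 then
    let ref_pos := ref_pos + length
    let query_pos := query_pos + length
    (new_ref ++ PySem.List.slice r (some (ref_pos - length)) (some ref_pos),
     new_query ++ PySem.List.slice q (some (query_pos - length)) (some query_pos),
     ref_pos, query_pos)
  else if operation = 1 then
    let query_pos := query_pos + length
    (new_ref ++ PySem.List.pyRepeat ['-'] length,
     new_query ++ PySem.List.slice q (some (query_pos - length)) (some query_pos),
     ref_pos, query_pos)
  else if operation = 2 then
    let ref_pos := ref_pos + length
    (new_ref ++ PySem.List.slice r (some (ref_pos - length)) (some ref_pos),
     new_query ++ PySem.List.pyRepeat ['-'] length,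
     ref_pos, query_pos)
  else if operation = 3 then
    (new_ref, new_query, ref_pos + length, query_pos)
  else if operation = 7 then
    let ref_pos := ref_pos + length
    let query_pos := query_pos + length
    (new_ref ++ PySem.List.slice r (some (ref_pos - length)) (some ref_pos),
     new_query ++ PySem.List.slice q (some (query_pos - length)) (some query_pos),
     ref_pos, query_pos)
  else if operation = 8 then
    let ref_pos := ref_pos + length
    let query_pos := query_pos + length
    (new_ref ++ PySem.List.slice r (some (ref_pos - length)) (some ref_pos),
     new_query ++ PySem.List.slice q (some (query_pos - length)) (some query_pos),
     ref_pos, query_pos)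
  else s

def expand_cigar (reference : String) (query : String) (cigartuples : List (Int × Int)) : String × String :=
  let st := cigartuples.foldl (pvAStep reference.toList query.toList) ([], [], 0, 0)
  (String.ofList st.1, String.ofList st.2.1)

-- ===== PORT B =====
-- the module-level tuples REF_ADV / QRY_ADV of Source B
def pvRefAdv : List Int := [0, 2, 3, 7, 8]
def pvQryAdv : List Int := [0, 1, 7, 8]

-- stage 1 of Source B: record each op's start positions, then advance the cursors
def pvStartsStep (s : List Int × List Int × Int × Int) (p : Int × Int) :
    List Int × List Int × Int × Int :=
  let (ref_starts, query_starts, r, q) := s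
  let (op, ln) := p
  let ref_starts := ref_starts ++ [r]
  let query_starts := query_starts ++ [q]
  let r := if op ∈ pvRefAdv then r + ln else r
  let q := if op ∈ pvQryAdv then q + ln else q
  (ref_starts, query_starts, r, q)

-- the per-op expression of Source B's stage-2 generator
def pvRefPiece (R : List Char) (p : Int × Int) (s : Int) : List Char :=
  if p.1 ∈ ([0, 2, 7, 8] : List Int) then PySem.List.slice R (some s) (some (s + p.2))
  else if p.1 = 1 then PySem.List.pyRepeat ['-'] p.2
  else []

-- the per-op expression of Source B's stage-3 generator
def pvQryPiece (Q : List Char) (p : Int × Int) (s : Int) : List Char :=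
  if p.1 ∈ ([0, 1, 7, 8] : List Int) then PySem.List.slice Q (some s) (some (s + p.2))
  else if p.1 = 2 then PySem.List.pyRepeat ['-'] p.2
  else []

def expand_cigar_alt (reference : String) (query : String) (cigartuples : List (Int × Int)) : String × String :=
  let st := cigartuples.foldl pvStartsStep ([], [], 0, 0)
  let new_ref := PySem.Chars.join []
    ((cigartuples.zip st.1).map (fun ps => pvRefPiece reference.toList ps.1 ps.2))
  let new_query := PySem.Chars.join []
    ((cigartuples.zip st.2.1).map (fun ps => pvQryPiece query.toList ps.1 ps.2))
  (String.ofList new_ref, String.ofList new_query)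

-- ===== PRECONDITION & SPEC =====
def Spec_expand_cigar (reference : String) (query : String) (cigartuples : List (Int × Int)) (out : String × String) : Prop := out = expand_cigar_alt reference query cigartuples
instance (reference : String) (query : String) (cigartuples : List (Int × Int)) (out : String × String) : Decidable (Spec_expand_cigar reference query cigartuples out) := by unfold Spec_expand_cigar; infer_instance

-- ===== CLAIM (what is proved, stated in full; the proofs are below) =====
def Claim_equal_expand_cigar : Prop := ∀ (reference : String) (query : String) (cigartuples : List (Int × Int)), Dom_expand_cigar reference query cigartuples → Spec_expand_cigar reference query cigartuples (expand_cigar reference query cigartuples)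

-- ===== LEMMAS AND PROOFS =====

-- the cursor position after an op (shared by both characterizations)
def pvRefNext (rp : Int) (p : Int × Int) : Int := if p.1 ∈ pvRefAdv then rp + p.2 else rp
def pvQryNext (qp : Int) (p : Int × Int) : Int := if p.1 ∈ pvQryAdv then qp + p.2 else qp

-- reference/query emission of the suffix, starting from given cursors
def pvRefEmit (R : List Char) (rp : Int) : List (Int × Int) → List Char
  | [] => []
  | p :: t => pvRefPiece R p rp ++ pvRefEmit R (pvRefNext rp p) t
def pvQryEmit (Q : List Char) (qp : Int) : List (Int × Int) → List Char
  | [] => []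
  | p :: t => pvQryPiece Q p qp ++ pvQryEmit Q (pvQryNext qp p) t

def pvRefFin (rp : Int) : List (Int × Int) → Int
  | [] => rp
  | p :: t => pvRefFin (pvRefNext rp p) t
def pvQryFin (qp : Int) : List (Int × Int) → Int
  | [] => qp
  | p :: t => pvQryFin (pvQryNext qp p) t

def pvRefStarts (rp : Int) : List (Int × Int) → List Int
  | [] => []
  | p :: t => rp :: pvRefStarts (pvRefNext rp p) t
def pvQryStarts (qp : Int) : List (Int × Int) → List Int
  | [] => []
  | p :: t => qp :: pvQryStarts (pvQryNext qp p) t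

-- A's fold, characterized: accumulated strings are the emissions, cursors the final positions
lemma pvA_char (R Q : List Char) (l : List (Int × Int)) :
    ∀ (nr nq : List Char) (rp qp : Int),
    l.foldl (pvAStep R Q) (nr, nq, rp, qp) =
      (nr ++ pvRefEmit R rp l, nq ++ pvQryEmit Q qp l, pvRefFin rp l, pvQryFin qp l) := by
  induction l with
  | nil => intro nr nq rp qp; simp [pvRefEmit, pvQryEmit, pvRefFin, pvQryFin]
  | cons p t ih =>
    intro nr nq rp qp
    obtain ⟨op, ln⟩ := p
    simp only [List.foldl_cons]
    by_cases h0 : op = 0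
    · subst h0
      simp [pvAStep, ih, pvRefEmit, pvQryEmit, pvRefFin, pvQryFin, pvRefPiece, pvQryPiece,
        pvRefNext, pvQryNext, pvRefAdv, pvQryAdv]
    by_cases h1 : op = 1
    · subst h1
      simp [pvAStep, ih, pvRefEmit, pvQryEmit, pvRefFin, pvQryFin, pvRefPiece, pvQryPiece,
        pvRefNext, pvQryNext, pvRefAdv, pvQryAdv]
    by_cases h2 : op = 2
    · subst h2
      simp [pvAStep, ih, pvRefEmit, pvQryEmit, pvRefFin, pvQryFin, pvRefPiece, pvQryPiece,
        pvRefNext, pvQryNext, pvRefAdv, pvQryAdv]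
    by_cases h3 : op = 3
    · subst h3
      simp [pvAStep, ih, pvRefEmit, pvQryEmit, pvRefFin, pvQryFin, pvRefPiece, pvQryPiece,
        pvRefNext, pvQryNext, pvRefAdv, pvQryAdv]
    by_cases h7 : op = 7
    · subst h7
      simp [pvAStep, ih, pvRefEmit, pvQryEmit, pvRefFin, pvQryFin, pvRefPiece, pvQryPiece,
        pvRefNext, pvQryNext, pvRefAdv, pvQryAdv]
    by_cases h8 : op = 8
    · subst h8
      simp [pvAStep, ih, pvRefEmit, pvQryEmit, pvRefFin, pvQryFin, pvRefPiece, pvQryPiece,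
        pvRefNext, pvQryNext, pvRefAdv, pvQryAdv]
    · simp [pvAStep, ih, pvRefEmit, pvQryEmit, pvRefFin, pvQryFin, pvRefPiece, pvQryPiece,
        pvRefNext, pvQryNext, pvRefAdv, pvQryAdv, h0, h1, h2, h3, h7, h8]

-- B's stage-1 fold, characterized by the recursive starts lists
lemma pvStarts_char (l : List (Int × Int)) :
    ∀ (ar aq : List Int) (rp qp : Int),
    l.foldl pvStartsStep (ar, aq, rp, qp) =
      (ar ++ pvRefStarts rp l, aq ++ pvQryStarts qp l, pvRefFin rp l, pvQryFin qp l) := by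
  induction l with
  | nil => intro ar aq rp qp; simp [pvRefStarts, pvQryStarts, pvRefFin, pvQryFin]
  | cons p t ih =>
    intro ar aq rp qp
    obtain ⟨op, ln⟩ := p
    simp [pvStartsStep, ih, pvRefStarts, pvQryStarts, pvRefFin, pvQryFin, pvRefNext, pvQryNext]

lemma pvJoin_nil_eq_flatten (L : List (List Char)) : PySem.Chars.join [] L = L.flatten := by
  induction L with
  | nil => rfl
  | cons x rest ih =>
    cases rest with
    | nil => simp [PySem.Chars.join_singleton]
    | cons y ys =>
      rw [PySem.Chars.join_cons_cons]
      simp_all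

-- stage 2: flattening the pieces over the precomputed starts is the reference emission
lemma pvRef_zip (R : List Char) (l : List (Int × Int)) :
    ∀ rp : Int,
    ((l.zip (pvRefStarts rp l)).map (fun ps => pvRefPiece R ps.1 ps.2)).flatten = pvRefEmit R rp l := by
  induction l with
  | nil => intro rp; simp [pvRefStarts, pvRefEmit]
  | cons p t ih => intro rp; simp [pvRefStarts, pvRefEmit, ih]

-- stage 3: likewise for the query emission
lemma pvQry_zip (Q : List Char) (l : List (Int × Int)) :
    ∀ qp : Int,
    ((l.zip (pvQryStarts qp l)).map (fun ps => pvQryPiece Q ps.1 ps.2)).flatten = pvQryEmit Q qp l := by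
  induction l with
  | nil => intro qp; simp [pvQryStarts, pvQryEmit]
  | cons p t ih => intro qp; simp [pvQryStarts, pvQryEmit, ih]

-- ===== VERDICT (by name: the statement is the Claim_ definition above) =====
theorem expand_cigar_spec : Claim_equal_expand_cigar := by
  intro reference query cigartuples _
  unfold Spec_expand_cigar expand_cigar expand_cigar_alt
  rw [pvA_char, pvStarts_char]
  simp [pvJoin_nil_eq_flatten, pvRef_zip, pvQry_zip]
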